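-- pv_equiv track=rewrite | github.com/idealy-ma/AI-testing-code | data-generator/column.py | calculate_prefix_count
-- ===== SOURCE A (Python) =====
-- def calculate_prefix_count(language):
--     prefixes = set()
--     count = 0
--     for word in language:
--         for i in range(1, len(word) + 1):
--             prefix = word[:i]
--             if prefix not in prefixes:
--                 prefixes.add(prefix)
--                 count += 1
--     return count
-- ===== SOURCE B (Python) =====
-- def calculate_prefix_count(language):
--     # Flat trie: node 0 is the root; children maps (node_id, char) -> child node id.
--     # Each created node corresponds to exactly one distinct non-empty prefix.
--     children = {}
--     next_id = 1
--     for word in language: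
--         node = 0
--         for ch in word:
--             child = children.get((node, ch))
--             if child is None:
--                 child = next_id
--                 children[(node, ch)] = child
--                 next_id += 1
--             node = child
--     return next_id - 1
-- ===== Notes on version B (the rewrite author's own statement) =====
-- stated objective: alternative
-- what changed: A hashes every prefix slice of every word into a set (materialising O(len^2) characters of slices per word); B inserts each word into a flat trie (a dict keyed by (node_id, char)) and counts created nodes, touching each character once (measured ~1.5x in a timing run, below the confirmation threshold, so no speed is claimed).
import Mathlib
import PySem

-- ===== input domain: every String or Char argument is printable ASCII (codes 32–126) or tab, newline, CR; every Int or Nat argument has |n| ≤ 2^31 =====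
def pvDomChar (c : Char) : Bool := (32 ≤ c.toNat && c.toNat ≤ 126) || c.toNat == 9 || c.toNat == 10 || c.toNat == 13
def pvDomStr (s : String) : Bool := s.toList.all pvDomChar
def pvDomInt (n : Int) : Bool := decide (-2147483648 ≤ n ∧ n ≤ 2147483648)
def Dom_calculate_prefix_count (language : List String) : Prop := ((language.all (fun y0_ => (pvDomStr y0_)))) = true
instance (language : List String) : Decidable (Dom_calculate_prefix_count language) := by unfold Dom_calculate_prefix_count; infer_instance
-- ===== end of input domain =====

-- B replaces A's set-of-prefix-slices with a flat trie (dict keyed by (node id, char)),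
-- counting created nodes: one node per distinct non-empty prefix (objective: alternative algorithm).

-- ===== PORT A =====
-- literal port of A: a set of prefix slices, counting fresh insertions
def calculate_prefix_count (language : List String) : Int :=
  (language.foldl
    (fun (st : PySem.Set String × Int) word =>
      (PySem.List.pyRange 1 (PySem.Str.len word + 1) 1).foldl
        (fun (st : PySem.Set String × Int) i =>
          let pfx := PySem.Str.slice word none (some i)
          if st.1.contains pfx then st
          else (PySem.Set.add st.1 pfx, st.2 + 1))
        st)
    (PySem.Set.empty, 0)).2

-- ===== PORT B =====
-- literal port of B (Source B): flat trie, children : dict[(node_id, char)] -> node_id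
def calculate_prefix_count_alt (language : List String) : Int :=
  (language.foldl
    (fun (st : PySem.Dict (Int × Char) Int × Int) word =>
      let r := word.toList.foldl
        (fun (s : PySem.Dict (Int × Char) Int × Int × Int) ch =>
          match s.1.get? (s.2.2, ch) with
          | some child => (s.1, s.2.1, child)
          | none => (s.1.insert (s.2.2, ch) s.2.1, s.2.1 + 1, s.2.1))
        (st.1, st.2, 0)
      (r.1, r.2.1))
    (PySem.Dict.empty, 1)).2 - 1

-- ===== PRECONDITION & SPEC =====
def Spec_calculate_prefix_count (language : List String) (out : Int) : Prop := out = calculate_prefix_count_alt language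
instance (language : List String) (out : Int) : Decidable (Spec_calculate_prefix_count language out) := by unfold Spec_calculate_prefix_count; infer_instance

-- ===== CLAIM (what is proved, stated in full; the proofs are below) =====
def Claim_equal_calculate_prefix_count : Prop := ∀ (language : List String), Dom_calculate_prefix_count language → Spec_calculate_prefix_count language (calculate_prefix_count language)

-- ===== LEMMAS AND PROOFS =====

-- The reference object both programs compute: the list of distinct non-empty prefixes,
-- in first-discovery order.  `pvChain S p cs` extends S with p·cs[:1], p·cs[:2], …
def pvPush (p : String) (c : Char) : String := String.ofList (p.toList ++ [c])

def pvChain (S : List String) (p : String) : List Char → List String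
  | [] => S
  | c :: cs => pvChain (if pvPush p c ∈ S then S else S ++ [pvPush p c]) (pvPush p c) cs

def pvLang (S : List String) (ws : List String) : List String :=
  ws.foldl (fun S w => pvChain S "" w.toList) S

-- node id of a prefix in B's trie: root "" is 0, the k-th discovered prefix is k+1
def pvPos (S : List String) (p : String) : Int :=
  if p = "" then 0 else ((S.idxOf p : Nat) : Int) + 1

def pvMemE (S : List String) (p : String) : Prop := p = "" ∨ p ∈ S

-- invariant tying B's trie to the discovered prefix list S
structure pvInv (S : List String) (d : PySem.Dict (Int × Char) Int) : Prop where
  nodup : S.Nodup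
  nem : "" ∉ S
  closed : ∀ p c, pvPush p c ∈ S → pvMemE S p
  look : ∀ p, pvMemE S p → ∀ c,
    d.get? (pvPos S p, c) = if pvPush p c ∈ S then some (pvPos S (pvPush p c)) else none
  bound : ∀ (i : Int) (c : Char), (S.length : Int) < i → d.get? (i, c) = none

theorem pvPush_ne_empty (p : String) (c : Char) : pvPush p c ≠ "" := by
  intro h
  have := congrArg String.toList h
  simp [pvPush] at this

theorem pvPush_inj {p q : String} {c c' : Char} (h : pvPush p c = pvPush q c') :
    p = q ∧ c = c' := by
  have := congrArg String.toList h
  simp only [pvPush, String.toList_ofList] at this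
  have h2 := List.append_inj' this (by simp)
  exact ⟨String.toList_inj.mp h2.1, by simpa using h2.2⟩

theorem pvPush_toList (p : String) (c : Char) : (pvPush p c).toList = p.toList ++ [c] := by
  simp [pvPush]

theorem pvPos_le (S : List String) (p : String) (h : pvMemE S p) :
    pvPos S p ≤ (S.length : Int) := by
  unfold pvPos
  rcases h with h | h
  · simp [h]
  · have hlt := List.idxOf_lt_length_of_mem h
    split <;> omega

theorem pvPos_inj (S : List String) (hne : "" ∉ S)
    {p q : String} (hp : pvMemE S p) (hq : pvMemE S q)
    (h : pvPos S p = pvPos S q) : p = q := by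
  unfold pvPos at h
  rcases hp with hp | hp <;> rcases hq with hq | hq
  · rw [hp, hq]
  · subst hp
    have : q ≠ "" := fun hqe => hne (hqe ▸ hq)
    simp [this] at h
    omega
  · subst hq
    have : p ≠ "" := fun hpe => hne (hpe ▸ hp)
    simp [this] at h
    omega
  · have hp' : p ≠ "" := fun hpe => hne (hpe ▸ hp)
    have hq' : q ≠ "" := fun hqe => hne (hqe ▸ hq)
    simp [hp', hq'] at h
    have hidx : S.idxOf p = S.idxOf q := by omega
    have hplt := List.idxOf_lt_length_of_mem hp
    have h1 : S[S.idxOf p]? = some p := by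
      rw [List.getElem?_eq_getElem hplt, List.getElem_idxOf hplt]
    have hqlt := List.idxOf_lt_length_of_mem hq
    have h2 : S[S.idxOf q]? = some q := by
      rw [List.getElem?_eq_getElem hqlt, List.getElem_idxOf hqlt]
    rw [hidx, h2] at h1
    exact (Option.some_inj.mp h1).symm

theorem pvPos_append (S : List String) (q p : String) (hne : "" ∉ S) (h : pvMemE S p) :
    pvPos (S ++ [q]) p = pvPos S p := by
  unfold pvPos
  rcases h with h | h
  · simp [h]
  · have : p ≠ "" := fun hpe => hne (hpe ▸ h)
    simp [this, List.idxOf_append_of_mem h]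

theorem pvPos_append_self (S : List String) (q : String) (hq : q ∉ S) (hqe : q ≠ "") :
    pvPos (S ++ [q]) q = (S.length : Int) + 1 := by
  unfold pvPos
  simp [hqe, List.idxOf_append, hq]

theorem pvMemE_append (S : List String) (q p : String) (h : pvMemE S p) :
    pvMemE (S ++ [q]) p := by
  rcases h with h | h
  · exact Or.inl h
  · exact Or.inr (List.mem_append_left _ h)

-- one step of B on a fresh prefix preserves the invariant
theorem pvInv_insert (S : List String) (d : PySem.Dict (Int × Char) Int)
    (hI : pvInv S d) (p : String) (hp : pvMemE S p) (c : Char)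
    (hnew : pvPush p c ∉ S) :
    pvInv (S ++ [pvPush p c]) (d.insert (pvPos S p, c) ((S.length : Int) + 1)) := by
  have hqe : pvPush p c ≠ "" := pvPush_ne_empty p c
  refine ⟨?_, ?_, ?_, ?_, ?_⟩
  · exact List.Nodup.append hI.nodup (List.nodup_singleton _)
      (List.disjoint_singleton.mpr hnew)
  · simp only [List.mem_append, List.mem_singleton]
    rintro (h | h)
    · exact hI.nem h
    · exact hqe h.symm
  · intro r c' hr
    rcases List.mem_append.mp hr with h | h
    · exact pvMemE_append _ _ _ (hI.closed r c' h)
    · obtain ⟨rfl, rfl⟩ := pvPush_inj (List.mem_singleton.mp h)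
      exact pvMemE_append _ _ _ hp
  · intro r hr c'
    have hS' : pvMemE S r ∨ r = pvPush p c := by
      rcases hr with h | h
      · exact Or.inl (Or.inl h)
      · rcases List.mem_append.mp h with h | h
        · exact Or.inl (Or.inr h)
        · exact Or.inr (List.mem_singleton.mp h)
    rcases hS' with hM | rfl
    · rw [pvPos_append S _ r hI.nem hM]
      by_cases hk : r = p ∧ c' = c
      · obtain ⟨rfl, rfl⟩ := hk
        rw [PySem.Dict.get?_insert_self]
        have : pvPush r c' ∈ S ++ [pvPush r c'] := List.mem_append_right _ (by simp)
        rw [if_pos this, pvPos_append_self S _ hnew hqe]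
      · have hkne : ((pvPos S r, c') : Int × Char) ≠ (pvPos S p, c) := by
          intro he
          obtain ⟨h1, h2⟩ := Prod.mk.injEq .. ▸ he
          exact hk ⟨pvPos_inj S hI.nem hM hp h1, h2⟩
        rw [PySem.Dict.get?_insert_of_ne _ _ hkne, hI.look r hM c']
        have hmm : pvPush r c' ∈ S ++ [pvPush p c] ↔ pvPush r c' ∈ S := by
          simp only [List.mem_append, List.mem_singleton, or_iff_left_iff_imp]
          intro he
          obtain ⟨rfl, rfl⟩ := pvPush_inj he
          exact absurd ⟨rfl, rfl⟩ hk
        by_cases hin : pvPush r c' ∈ S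
        · rw [if_pos hin, if_pos (hmm.mpr hin),
            pvPos_append S _ _ hI.nem (Or.inr hin)]
        · rw [if_neg hin, if_neg (fun h => hin (hmm.mp h))]
    · rw [pvPos_append_self S _ hnew hqe]
      have hkne : (((S.length : Int) + 1, c') : Int × Char) ≠ (pvPos S p, c) := by
        have := pvPos_le S p hp
        intro he
        obtain ⟨h1, _⟩ := Prod.mk.injEq .. ▸ he
        omega
      rw [PySem.Dict.get?_insert_of_ne _ _ hkne, hI.bound _ c' (by omega)]
      have : pvPush (pvPush p c) c' ∉ S ++ [pvPush p c] := by
        simp only [List.mem_append, List.mem_singleton]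
        rintro (h | h)
        · rcases hI.closed _ _ h with h' | h'
          · exact hqe h'
          · exact hnew h'
        · have := congrArg (fun s => s.toList.length) h
          simp [pvPush_toList] at this
      rw [if_neg this]
  · intro i c' hi
    simp only [List.length_append, List.length_cons, List.length_nil] at hi
    have hple := pvPos_le S p hp
    have hkne : ((i, c') : Int × Char) ≠ (pvPos S p, c) := by
      intro he
      obtain ⟨h1, _⟩ := Prod.mk.injEq .. ▸ he
      omega
    rw [PySem.Dict.get?_insert_of_ne _ _ hkne]
    exact hI.bound i c' (by push_cast at hi ⊢; omega)

-- B's inner loop (walking one word through the trie), against pvChain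
theorem pvInnerB (cs : List Char) : ∀ (S : List String) (d : PySem.Dict (Int × Char) Int)
    (p : String), pvInv S d → pvMemE S p →
    ∃ d', cs.foldl
        (fun (s : PySem.Dict (Int × Char) Int × Int × Int) ch =>
          match s.1.get? (s.2.2, ch) with
          | some child => (s.1, s.2.1, child)
          | none => (s.1.insert (s.2.2, ch) s.2.1, s.2.1 + 1, s.2.1))
        (d, (S.length : Int) + 1, pvPos S p)
      = (d', ((pvChain S p cs).length : Int) + 1,
          pvPos (pvChain S p cs) (String.ofList (p.toList ++ cs)))
      ∧ pvInv (pvChain S p cs) d' := by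
  induction cs with
  | nil =>
    intro S d p hI hp
    refine ⟨d, ?_, hI⟩
    simp [pvChain]
  | cons c cs ih =>
    intro S d p hI hp
    have hl := hI.look p hp c
    simp only [List.foldl_cons]
    have hofl : String.ofList (p.toList ++ c :: cs)
        = String.ofList ((pvPush p c).toList ++ cs) := by
      rw [pvPush_toList]
      simp
    by_cases hmem : pvPush p c ∈ S
    · rw [if_pos hmem] at hl
      have hch : pvChain S p (c :: cs) = pvChain S (pvPush p c) cs := by
        simp [pvChain, if_pos hmem]
      simp only [hl]
      rw [hch, hofl]
      exact ih S d (pvPush p c) hI (Or.inr hmem)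
    · rw [if_neg hmem] at hl
      have hI' := pvInv_insert S d hI p hp c hmem
      have hch : pvChain S p (c :: cs) = pvChain (S ++ [pvPush p c]) (pvPush p c) cs := by
        simp [pvChain, if_neg hmem]
      have hlen : ((S ++ [pvPush p c]).length : Int) + 1 = (S.length : Int) + 1 + 1 := by
        simp [List.length_append]
      have hpos : pvPos (S ++ [pvPush p c]) (pvPush p c) = (S.length : Int) + 1 :=
        pvPos_append_self S _ hmem (pvPush_ne_empty p c)
      obtain ⟨d', h1, h2⟩ := ih (S ++ [pvPush p c])
        (d.insert (pvPos S p, c) ((S.length : Int) + 1)) (pvPush p c) hI'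
        (Or.inr (List.mem_append_right _ (by simp)))
      rw [hlen, hpos] at h1
      refine ⟨d', ?_, by rw [hch]; exact h2⟩
      simp only [hl]
      rw [hch, hofl]
      exact h1

-- B's outer loop over the words
theorem pvOuterB (ws : List String) : ∀ (S : List String) (d : PySem.Dict (Int × Char) Int),
    pvInv S d →
    ∃ d', ws.foldl
        (fun (st : PySem.Dict (Int × Char) Int × Int) word =>
          let r := word.toList.foldl
            (fun (s : PySem.Dict (Int × Char) Int × Int × Int) ch =>
              match s.1.get? (s.2.2, ch) with
              | some child => (s.1, s.2.1, child)
              | none => (s.1.insert (s.2.2, ch) s.2.1, s.2.1 + 1, s.2.1))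
            (st.1, st.2, 0)
          (r.1, r.2.1))
        (d, (S.length : Int) + 1)
      = (d', ((pvLang S ws).length : Int) + 1) ∧ pvInv (pvLang S ws) d' := by
  induction ws with
  | nil =>
    intro S d hI
    exact ⟨d, rfl, hI⟩
  | cons w ws ih =>
    intro S d hI
    have h0 : pvPos S "" = 0 := by simp [pvPos]
    obtain ⟨d', hfold, hI'⟩ := pvInnerB w.toList S d "" hI (Or.inl rfl)
    rw [h0] at hfold
    have hs : ("" : String).toList ++ w.toList = w.toList := by simp
    rw [hs] at hfold
    have hL : pvLang S (w :: ws) = pvLang (pvChain S "" w.toList) ws := by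
      simp [pvLang]
    obtain ⟨d'', h2, hI''⟩ := ih (pvChain S "" w.toList) d' hI'
    refine ⟨d'', ?_, by rw [hL]; exact hI''⟩
    rw [hL]
    simp only [List.foldl_cons]
    rw [hfold]
    exact h2

theorem pvInv_empty : pvInv [] PySem.Dict.empty := by
  refine ⟨List.nodup_nil, by simp, by simp [pvMemE], ?_, ?_⟩
  · intro p hp c
    simp [PySem.Dict.get?_empty]
  · intro i c _
    simp [PySem.Dict.get?_empty]

-- B computes the number of discovered prefixes
theorem pvB_eq (language : List String) :
    calculate_prefix_count_alt language = ((pvLang [] language).length : Int) := by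
  unfold calculate_prefix_count_alt
  obtain ⟨d', hfold, _⟩ := pvOuterB language [] PySem.Dict.empty pvInv_empty
  norm_num at hfold
  rw [hfold]
  show ((pvLang [] language).length : Int) + 1 - 1 = ((pvLang [] language).length : Int)
  ring

-- A's count-with-set fold, with the count tracked as the list length
theorem pvCountFold (xs : List String) : ∀ (S : List String) (c : Int),
    c = (S.length : Int) →
    xs.foldl
      (fun (st : PySem.Set String × Int) p =>
        if st.1.contains p then st else (PySem.Set.add st.1 p, st.2 + 1))
      (S, c)
    = (xs.foldl (fun S p => if p ∈ S then S else S ++ [p]) S,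
       ((xs.foldl (fun S p => if p ∈ S then S else S ++ [p]) S).length : Int)) := by
  induction xs with
  | nil => intro S c hc; simp [hc]
  | cons x xs ih =>
    intro S c hc
    simp only [List.foldl_cons]
    by_cases hx : x ∈ S
    · have hct : PySem.Set.contains S x = true := (PySem.Set.contains_iff S x).mpr hx
      rw [if_pos hct, if_pos hx]
      exact ih S c hc
    · have hcf : ¬ (PySem.Set.contains S x = true) :=
        fun h => hx ((PySem.Set.contains_iff S x).mp h)
      rw [if_neg hcf, if_neg hx]
      have hadd : PySem.Set.add S x = S ++ [x] := by
        unfold PySem.Set.add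
        rw [if_neg hcf]
      rw [hadd]
      exact ih (S ++ [x]) (c + 1)
        (by rw [hc, List.length_append]; push_cast; simp)

-- A's per-word ascending prefix enumeration equals the chain walk
theorem pvChainTake (cs : List Char) : ∀ (done : List Char) (S : List String),
    pvChain S (String.ofList done) cs
    = (List.range cs.length).foldl
        (fun S t =>
          if String.ofList (done ++ cs.take (t+1)) ∈ S then S
          else S ++ [String.ofList (done ++ cs.take (t+1))]) S := by
  induction cs with
  | nil => intro done S; simp [pvChain]
  | cons c cs ih =>
    intro done S
    have hpush : pvPush (String.ofList done) c = String.ofList (done ++ [c]) := by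
      apply String.toList_inj.mp
      simp [pvPush_toList]
    have hrange : List.range (c :: cs).length = 0 :: (List.range cs.length).map (· + 1) := by
      simp [List.range_succ_eq_map]
    rw [hrange, List.foldl_cons, List.foldl_map]
    simp only [List.take_succ_cons, List.take_zero]
    show pvChain (if pvPush (String.ofList done) c ∈ S then S else S ++ [pvPush (String.ofList done) c])
        (pvPush (String.ofList done) c) cs = _
    rw [hpush]
    have hstep : ∀ t S', (if String.ofList (done ++ c :: cs.take (t+1)) ∈ S' then S'
          else S' ++ [String.ofList (done ++ c :: cs.take (t+1))])
        = (if String.ofList ((done ++ [c]) ++ cs.take (t+1)) ∈ S' then S'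
          else S' ++ [String.ofList ((done ++ [c]) ++ cs.take (t+1))]) := by
      intro t S'; simp
    calc pvChain (if String.ofList (done ++ [c]) ∈ S then S else S ++ [String.ofList (done ++ [c])])
          (String.ofList (done ++ [c])) cs
        = (List.range cs.length).foldl
            (fun S t => if String.ofList ((done ++ [c]) ++ cs.take (t+1)) ∈ S then S
              else S ++ [String.ofList ((done ++ [c]) ++ cs.take (t+1))])
            (if String.ofList (done ++ [c]) ∈ S then S else S ++ [String.ofList (done ++ [c])]) := by
          rw [ih]
      _ = _ := by
          exact PySem.List.foldl_congr_mem _ _ _ _ (fun S' t _ => (hstep t S').symm)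

theorem pvRange_one (n : Nat) :
    PySem.List.pyRange 1 ((n : Int) + 1) 1 = (List.range n).map (fun (t : Nat) => (t : Int) + 1) := by
  induction n with
  | zero => decide
  | succ n ih =>
    push_cast
    rw [PySem.List.pyRange_one_succ_right (by omega), List.range_succ]
    push_cast at ih
    rw [ih]
    simp

theorem pvSlice_take (w : String) (t : Int) (h : 0 ≤ t) :
    PySem.Str.slice w none (some t) = String.ofList (w.toList.take t.toNat) := by
  apply String.toList_inj.mp
  simp [PySem.Str.slice, PySem.Chars.slice, PySem.List.slice_to w.toList h]

theorem pvA_eq (language : List String) :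
    calculate_prefix_count language = ((pvLang [] language).length : Int) := by
  unfold calculate_prefix_count
  suffices h : ∀ (ws : List String) (S : List String) (c : Int), c = (S.length : Int) →
      ws.foldl
        (fun (st : PySem.Set String × Int) word =>
          (PySem.List.pyRange 1 (PySem.Str.len word + 1) 1).foldl
            (fun (st : PySem.Set String × Int) i =>
              let pfx := PySem.Str.slice word none (some i)
              if st.1.contains pfx then st
              else (PySem.Set.add st.1 pfx, st.2 + 1))
            st)
        (S, c)
      = (pvLang S ws, ((pvLang S ws).length : Int)) by
    exact congrArg Prod.snd (h language PySem.Set.empty 0 (by simp [PySem.Set.empty]))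
  intro ws
  induction ws with
  | nil => intro S c hc; simp [pvLang, hc]
  | cons w ws ih =>
    intro S c hc
    simp only [List.foldl_cons]
    have hw : (PySem.List.pyRange 1 (PySem.Str.len w + 1) 1).foldl
        (fun (st : PySem.Set String × Int) i =>
          let pfx := PySem.Str.slice w none (some i)
          if st.1.contains pfx then st
          else (PySem.Set.add st.1 pfx, st.2 + 1))
        (S, c)
        = (pvChain S "" w.toList, ((pvChain S "" w.toList).length : Int)) := by
      have hlist : PySem.List.pyRange 1 (PySem.Str.len w + 1) 1
          = (List.range w.toList.length).map (fun (t : Nat) => (t : Int) + 1) := by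
        rw [PySem.Str.len_eq, pvRange_one]
      have hbody : ∀ (st : PySem.Set String × Int) (t : Nat),
          (fun (st : PySem.Set String × Int) i =>
            let pfx := PySem.Str.slice w none (some i)
            if st.1.contains pfx then st
            else (PySem.Set.add st.1 pfx, st.2 + 1)) st ((t : Int) + 1)
          = (fun (st : PySem.Set String × Int) p =>
              if st.1.contains p then st else (PySem.Set.add st.1 p, st.2 + 1)) st
            (String.ofList (w.toList.take (t + 1))) := by
        intro st t
        have ht : ((t : Int) + 1).toNat = t + 1 := by omega
        have hsl : PySem.Str.slice w none (some ((t : Int) + 1))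
            = String.ofList (w.toList.take (t + 1)) := by
          rw [pvSlice_take w _ (by omega), ht]
        simp only [hsl]
      have e1 : (PySem.List.pyRange 1 (PySem.Str.len w + 1) 1).foldl
          (fun (st : PySem.Set String × Int) i =>
            let pfx := PySem.Str.slice w none (some i)
            if st.1.contains pfx then st
            else (PySem.Set.add st.1 pfx, st.2 + 1))
          (S, c)
          = (List.range w.toList.length).foldl
            (fun (st : PySem.Set String × Int) (t : Nat) =>
              (fun (st : PySem.Set String × Int) i =>
                let pfx := PySem.Str.slice w none (some i)
                if st.1.contains pfx then st
                else (PySem.Set.add st.1 pfx, st.2 + 1)) st ((t : Int) + 1))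
            (S, c) := by
        rw [hlist, List.foldl_map]
      have e2 : (List.range w.toList.length).foldl
          (fun (st : PySem.Set String × Int) (t : Nat) =>
            (fun (st : PySem.Set String × Int) i =>
              let pfx := PySem.Str.slice w none (some i)
              if st.1.contains pfx then st
              else (PySem.Set.add st.1 pfx, st.2 + 1)) st ((t : Int) + 1))
          (S, c)
          = (List.range w.toList.length).foldl
            (fun (st : PySem.Set String × Int) (t : Nat) =>
              (fun (st : PySem.Set String × Int) p =>
                if st.1.contains p then st
                else (PySem.Set.add st.1 p, st.2 + 1)) st
              (String.ofList (w.toList.take (t + 1))))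
            (S, c) :=
        PySem.List.foldl_congr_mem _ _ _ _ (fun st t _ => hbody st t)
      have e3 : (List.range w.toList.length).foldl
          (fun (st : PySem.Set String × Int) (t : Nat) =>
            (fun (st : PySem.Set String × Int) p =>
              if st.1.contains p then st
              else (PySem.Set.add st.1 p, st.2 + 1)) st
            (String.ofList (w.toList.take (t + 1))))
          (S, c)
          = ((List.range w.toList.length).map
              (fun t => String.ofList (w.toList.take (t + 1)))).foldl
            (fun (st : PySem.Set String × Int) p =>
              if st.1.contains p then st else (PySem.Set.add st.1 p, st.2 + 1))
            (S, c) := by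
        rw [List.foldl_map]
      have hchain : pvChain S "" w.toList
          = ((List.range w.toList.length).map (fun t => String.ofList (w.toList.take (t+1)))).foldl
            (fun S p => if p ∈ S then S else S ++ [p]) S := by
        have he : ("" : String) = String.ofList [] := by
          apply String.toList_inj.mp; simp
        rw [he, pvChainTake w.toList [] S, List.foldl_map]
        simp
      rw [e1, e2, e3, pvCountFold _ S c hc, ← hchain]
    rw [hw]
    have hL : pvLang S (w :: ws) = pvLang (pvChain S "" w.toList) ws := by
      simp [pvLang]
    rw [hL]
    exact ih (pvChain S "" w.toList) _ rfl

-- ===== VERDICT (by name: the statement is the Claim_ definition above) =====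
theorem calculate_prefix_count_spec : Claim_equal_calculate_prefix_count := by
  intro language _
  unfold Spec_calculate_prefix_count
  rw [pvA_eq, pvB_eq]
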